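-- pv_equiv track=rewrite | github.com/Bonifatius94/aoc2023 | 03_2/main.py | find_digit_bounds
-- ===== SOURCE A (Python) =====
-- from typing import List, Tuple, Dict, Set, Any
--
-- def find_digit_bounds(lines: List[str]) -> Tuple[List[Tuple[int, int]], List[Tuple[int, int]]]:
--     char_pairs = lambda line: zip([None] + [c for c in line], [c for c in line] + [None])
--
--     start_pos = [(col, row)
--                  for row, line in enumerate(lines)
--                  for col, (c1, c2) in enumerate(char_pairs(line))
--                  if (c1 is None and c2.isdigit()) or (c1 is not None and c2 is not None \
--                                                       and not c1.isdigit() and c2.isdigit())]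
--
--     end_pos = [(col, row)
--                for row, line in enumerate(lines)
--                for col, (c1, c2) in enumerate(char_pairs(line))
--                if (c2 is None and c1.isdigit()) or (c1 is not None and c2 is not None \
--                                                     and c1.isdigit() and not c2.isdigit())]
--
--     return start_pos, end_pos
-- ===== SOURCE B (Python) =====
-- def find_digit_bounds(lines):
--     start_pos, end_pos = [], []
--     for row, line in enumerate(lines):
--         prev = False
--         for col, ch in enumerate(line):
--             d = '0' <= ch <= '9'
--             if d and not prev:
--                 start_pos.append((col, row))
--             if prev and not d:
--                 end_pos.append((col, row))
--             prev = d
--         if '0' <= line[-1] <= '9':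
--             end_pos.append((len(line), row))
--     return start_pos, end_pos
-- ===== Notes on version B (the rewrite author's own statement) =====
-- stated objective: faster
-- what changed: Replaces the two zip([None]+chars, chars+[None]) list-comprehension passes per line by a single left-to-right scan per line that keeps a previous-char-was-digit boolean and emits run starts and exclusive run ends in the same loop, with no intermediate char lists.
import Mathlib
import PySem

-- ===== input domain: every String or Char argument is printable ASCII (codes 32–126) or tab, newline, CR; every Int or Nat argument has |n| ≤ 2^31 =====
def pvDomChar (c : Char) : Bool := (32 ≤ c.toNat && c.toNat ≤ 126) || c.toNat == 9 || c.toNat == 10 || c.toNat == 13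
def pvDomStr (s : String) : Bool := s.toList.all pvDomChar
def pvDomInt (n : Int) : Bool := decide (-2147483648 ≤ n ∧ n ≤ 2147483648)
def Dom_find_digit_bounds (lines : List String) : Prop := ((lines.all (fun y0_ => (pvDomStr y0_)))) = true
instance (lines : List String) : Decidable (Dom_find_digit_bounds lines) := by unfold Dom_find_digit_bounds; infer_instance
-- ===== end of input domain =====

-- B replaces A's two zip-based list-comprehension passes by a single scan per line keeping an
-- "inside a digit run" flag (measured faster in a timing run); same return value wherever
-- A returns (both Pythons raise on inputs containing an empty line, excluded by Pre_).

-- ===== PORT A =====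
-- zip([None] + [c for c in line], [c for c in line] + [None])
def charPairs (cs : List Char) : List (Option Char × Option Char) :=
  List.zip ((none : Option Char) :: cs.map some) (cs.map some ++ [none])

-- the start filter of A; (none, none) (only reachable for an empty line, excluded by Pre_,
-- where Python raises AttributeError) is mapped to false
def startCond (c1 c2 : Option Char) : Bool :=
  match c1, c2 with
  | none, some b => PySem.Chars.isdigit b
  | some a, some b => !PySem.Chars.isdigit a && PySem.Chars.isdigit b
  | _, _ => false

-- the end filter of A; (none, none) as above
def endCond (c1 c2 : Option Char) : Bool :=
  match c2, c1 with
  | none, some a => PySem.Chars.isdigit a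
  | some b, some a => PySem.Chars.isdigit a && !PySem.Chars.isdigit b
  | _, _ => false

def find_digit_bounds (lines : List String) : (List (Int × Int)) × (List (Int × Int)) :=
  let start_pos := (PySem.List.enumerate lines 0).flatMap (fun p =>
    (PySem.List.enumerate (charPairs p.2.toList) 0).filterMap (fun q =>
      if startCond q.2.1 q.2.2 then some (q.1, p.1) else none))
  let end_pos := (PySem.List.enumerate lines 0).flatMap (fun p =>
    (PySem.List.enumerate (charPairs p.2.toList) 0).filterMap (fun q =>
      if endCond q.2.1 q.2.2 then some (q.1, p.1) else none))
  (start_pos, end_pos)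

-- ===== PORT B =====
-- the inner loop body of Source B: state (start_pos, end_pos, in_run), element (col, ch)
def altStep (row : Int) (st : List (Int × Int) × List (Int × Int) × Bool) (q : Int × Char) :
    List (Int × Int) × List (Int × Int) × Bool :=
  let d := '0' ≤ q.2 && q.2 ≤ '9'
  (if d && !st.2.2 then st.1 ++ [(q.1, row)] else st.1,
   if st.2.2 && !d then st.2.1 ++ [(q.1, row)] else st.2.1,
   d)

-- one iteration of Source B's outer loop over enumerate(lines); line[-1] is pyGet? cs (-1):
-- none = IndexError on an empty line (outside Pre_, where Python B raises)
def altLine (acc : List (Int × Int) × List (Int × Int)) (p : Int × String) :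
    List (Int × Int) × List (Int × Int) :=
  let cs := p.2.toList
  let r := (PySem.List.enumerate cs 0).foldl (altStep p.1) (acc.1, acc.2, false)
  (r.1,
   match PySem.List.pyGet? cs (-1) with
   | some c => if '0' ≤ c && c ≤ '9' then r.2.1 ++ [((cs.length : Int), p.1)] else r.2.1
   | none => r.2.1)

def find_digit_bounds_alt (lines : List String) : (List (Int × Int)) × (List (Int × Int)) :=
  (PySem.List.enumerate lines 0).foldl altLine ([], [])

-- ===== PRECONDITION & SPEC =====
-- Pre_ excludes inputs containing an empty line: there A raises AttributeError
-- (None.isdigit() on the single (None, None) pair) and B raises IndexError (line[-1]).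
def Pre_find_digit_bounds (lines : List String) : Prop := ∀ s ∈ lines, 0 < s.length
instance (lines : List String) : Decidable (Pre_find_digit_bounds lines) := by
  unfold Pre_find_digit_bounds; infer_instance

def pvWitness_find_digit_bounds : List String := ["467..114..", "...*......", "..35..633.", "617*......", ".....+.58.", "x9abc12"]

def Spec_find_digit_bounds (lines : List String) (out : (List (Int × Int)) × (List (Int × Int))) : Prop := out = find_digit_bounds_alt lines
instance (lines : List String) (out : (List (Int × Int)) × (List (Int × Int))) : Decidable (Spec_find_digit_bounds lines out) := by unfold Spec_find_digit_bounds; infer_instance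

-- ===== CLAIM (what is proved, stated in full; the proofs are below) =====
def Claim_equal_find_digit_bounds : Prop := ∀ (lines : List String), Dom_find_digit_bounds lines → Pre_find_digit_bounds lines → Spec_find_digit_bounds lines (find_digit_bounds lines)

-- ===== LEMMAS AND PROOFS =====

-- canonical per-line run descriptions (proof-only helpers)
theorem digit_range_eq (c : Char) : ('0' ≤ c && c ≤ '9') = PySem.Chars.isdigit c := by
  simp [PySem.Chars.isdigit]

def rowS (ir : Bool) (n row : Int) : List Char → List (Int × Int)
  | [] => []
  | c :: cs => (if PySem.Chars.isdigit c && !ir then [(n, row)] else []) ++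
               rowS (PySem.Chars.isdigit c) (n + 1) row cs

def rowEp (ir : Bool) (n row : Int) : List Char → List (Int × Int)
  | [] => []
  | c :: cs => (if ir && !PySem.Chars.isdigit c then [(n, row)] else []) ++
               rowEp (PySem.Chars.isdigit c) (n + 1) row cs

def rowE (ir : Bool) (n row : Int) : List Char → List (Int × Int)
  | [] => if ir then [(n, row)] else []
  | c :: cs => (if ir && !PySem.Chars.isdigit c then [(n, row)] else []) ++
               rowE (PySem.Chars.isdigit c) (n + 1) row cs

def lastD (ir : Bool) : List Char → Bool
  | [] => ir
  | c :: cs => lastD (PySem.Chars.isdigit c) cs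

def pairsFrom (prev : Option Char) (cs : List Char) : List (Option Char × Option Char) :=
  List.zip (prev :: cs.map some) (cs.map some ++ [none])

def digOpt : Option Char → Bool
  | none => false
  | some c => PySem.Chars.isdigit c

theorem charPairs_eq_pairsFrom (cs : List Char) : charPairs cs = pairsFrom none cs := rfl

theorem pairsFrom_nil (prev : Option Char) : pairsFrom prev [] = [(prev, none)] := rfl

theorem pairsFrom_cons (prev : Option Char) (c : Char) (cs : List Char) :
    pairsFrom prev (c :: cs) = (prev, some c) :: pairsFrom (some c) cs := rfl

theorem A_starts (cs : List Char) : ∀ (prev : Option Char) (n row : Int),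
    (PySem.List.enumerate (pairsFrom prev cs) n).filterMap (fun q =>
      if startCond q.2.1 q.2.2 then some (q.1, row) else none) = rowS (digOpt prev) n row cs := by
  induction cs with
  | nil =>
    intro prev n row
    cases prev <;>
      simp [pairsFrom_nil, PySem.List.enumerate_cons, PySem.List.enumerate_nil,
        startCond, rowS]
  | cons c cs ih =>
    intro prev n row
    rw [pairsFrom_cons, PySem.List.enumerate_cons, List.filterMap_cons, ih]
    cases prev <;>
      · simp only [startCond, digOpt, rowS]
        by_cases hd : PySem.Chars.isdigit c <;> simp_all <;>
          first
          | rfl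
          | (rename_i a; by_cases ha : PySem.Chars.isdigit a <;> simp_all)

theorem A_ends (cs : List Char) : ∀ (prev : Option Char) (n row : Int),
    (PySem.List.enumerate (pairsFrom prev cs) n).filterMap (fun q =>
      if endCond q.2.1 q.2.2 then some (q.1, row) else none) = rowE (digOpt prev) n row cs := by
  induction cs with
  | nil =>
    intro prev n row
    cases prev <;>
      simp [pairsFrom_nil, PySem.List.enumerate_cons, PySem.List.enumerate_nil,
        endCond, rowE, digOpt] ; split <;> simp_all
  | cons c cs ih =>
    intro prev n row
    rw [pairsFrom_cons, PySem.List.enumerate_cons, List.filterMap_cons, ih]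
    cases prev <;>
      · simp only [endCond, digOpt, rowE]
        by_cases hd : PySem.Chars.isdigit c <;> simp_all <;>
          first
          | rfl
          | (rename_i a; by_cases ha : PySem.Chars.isdigit a <;> simp_all)

theorem B_fold (row : Int) (cs : List Char) : ∀ (n : Int) (s0 e0 : List (Int × Int)) (ir0 : Bool),
    (PySem.List.enumerate cs n).foldl (altStep row) (s0, e0, ir0) =
      (s0 ++ rowS ir0 n row cs, e0 ++ rowEp ir0 n row cs, lastD ir0 cs) := by
  induction cs with
  | nil => intro n s0 e0 ir0; simp [PySem.List.enumerate_nil, rowS, rowEp, lastD]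
  | cons c cs ih =>
    intro n s0 e0 ir0
    rw [PySem.List.enumerate_cons, List.foldl_cons]
    show (PySem.List.enumerate cs (n + 1)).foldl (altStep row) (altStep row (s0, e0, ir0) (n, c)) = _
    simp only [altStep, digit_range_eq]
    rw [ih]
    simp only [rowS, rowEp, lastD]
    by_cases hd : PySem.Chars.isdigit c <;> cases ir0 <;> simp [hd]

theorem rowE_eq (row : Int) (cs : List Char) : ∀ (ir : Bool) (n : Int),
    rowE ir n row cs = rowEp ir n row cs ++
      (if lastD ir cs then [(n + (cs.length : Int), row)] else []) := by
  induction cs with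
  | nil => intro ir n; cases ir <;> simp [rowE, rowEp, lastD]
  | cons c cs ih =>
    intro ir n
    simp only [rowE, rowEp, lastD, ih, List.append_assoc]
    have : n + 1 + (cs.length : Int) = n + ((c :: cs).length : Int) := by
      simp; ring
    rw [this]
    rfl

theorem pyGet?_neg_one_of_getLast? (cs : List Char) (a : Char) (h : cs.getLast? = some a) :
    PySem.List.pyGet? cs (-1) = some a := by
  have hne : cs ≠ [] := by rintro rfl; simp at h
  have hl : 1 ≤ cs.length := List.length_pos_iff.mpr hne
  simp [PySem.List.pyGet?, PySem.List.pyIdx?, hl, ← List.getLast?_eq_getElem?, h]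

theorem lastD_eq_getLast? (cs : List Char) : ∀ ir : Bool,
    lastD ir cs = (match cs.getLast? with
      | none => ir
      | some c => PySem.Chars.isdigit c) := by
  induction cs with
  | nil => intro ir; simp [lastD]
  | cons c cs ih =>
    intro ir
    rw [lastD, ih]
    cases cs with
    | nil => simp
    | cons d ds =>
      rw [List.getLast?_cons_cons]
      cases h2 : (d :: ds).getLast? with
      | none => exact absurd (List.getLast?_eq_none_iff.mp h2) (by simp)
      | some e => simp

theorem altLine_eq (acc : List (Int × Int) × List (Int × Int)) (row : Int) (line : String) :
    altLine acc (row, line) =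
      (acc.1 ++ rowS false 0 row line.toList, acc.2 ++ rowE false 0 row line.toList) := by
  simp only [altLine, B_fold]
  rw [rowE_eq]
  cases h : line.toList.getLast? with
  | none =>
    have : line.toList = [] := List.getLast?_eq_none_iff.mp h
    simp [this, PySem.List.pyGet?, PySem.List.pyIdx?, lastD]
  | some a =>
    rw [pyGet?_neg_one_of_getLast? _ _ h, lastD_eq_getLast?, h]
    simp only [digit_range_eq]
    by_cases hd : PySem.Chars.isdigit a = true <;> simp [hd]

theorem B_outer (lines : List String) : ∀ (n : Int) (S0 E0 : List (Int × Int)),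
    (PySem.List.enumerate lines n).foldl altLine (S0, E0) =
      (S0 ++ (PySem.List.enumerate lines n).flatMap (fun p => rowS false 0 p.1 p.2.toList),
       E0 ++ (PySem.List.enumerate lines n).flatMap (fun p => rowE false 0 p.1 p.2.toList)) := by
  induction lines with
  | nil => intro n S0 E0; simp [PySem.List.enumerate_nil]
  | cons l ls ih =>
    intro n S0 E0
    rw [PySem.List.enumerate_cons, List.foldl_cons, altLine_eq, ih]
    simp [List.flatMap_cons, List.append_assoc]

theorem ports_agree (lines : List String) :
    find_digit_bounds lines = find_digit_bounds_alt lines := by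
  unfold find_digit_bounds find_digit_bounds_alt
  rw [B_outer]
  simp only [List.nil_append]
  have hs : (fun p : Int × String =>
      (PySem.List.enumerate (charPairs p.2.toList) 0).filterMap (fun q =>
        if startCond q.2.1 q.2.2 then some (q.1, p.1) else none)) =
      (fun p : Int × String => rowS false 0 p.1 p.2.toList) := by
    funext p
    rw [charPairs_eq_pairsFrom]
    exact A_starts p.2.toList none 0 p.1
  have he : (fun p : Int × String =>
      (PySem.List.enumerate (charPairs p.2.toList) 0).filterMap (fun q =>
        if endCond q.2.1 q.2.2 then some (q.1, p.1) else none)) =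
      (fun p : Int × String => rowE false 0 p.1 p.2.toList) := by
    funext p
    rw [charPairs_eq_pairsFrom]
    exact A_ends p.2.toList none 0 p.1
  rw [hs, he]

-- ===== VERDICT (by name: the statement is the Claim_ definition above) =====
theorem find_digit_bounds_spec : Claim_equal_find_digit_bounds := by
  intro lines _ _
  unfold Spec_find_digit_bounds
  exact ports_agree lines
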